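-- pv_equiv track=rewrite | github.com/gcount85/algorithms-practice | 99. book_codingtestpython/추천 문제/배열03.py | solution
-- ===== SOURCE A (Python) =====
-- def solution(n, left, right):
--     start_row = left // n
--     end_row = right // n
--     new_list = []
--     for i in range(start_row, end_row + 1):
--         for j in range(n):
--             if j <= i:
--                 new_list.append(i + 1)
--             else:
--                 new_list.append(j + 1)
--     return new_list[left % n : ((end_row - start_row) * n) + (right % n) + 1]
-- ===== SOURCE B (Python) =====
-- def solution(n, left, right):
--     # value at flat index k of the n x n grid where cell (i, j) holds max(i, j) + 1
--     return [max(k // n, k % n) + 1 for k in range(left, right + 1)]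
-- ===== Notes on version B (the rewrite author's own statement) =====
-- stated objective: simpler
-- what changed: Instead of materialising every row from left//n to right//n and slicing the flat list, B computes each requested flat index k directly as max(k//n, k%n)+1 in a single comprehension over [left, right].
-- outside the precondition, e.g. on solution(0, 0, 3): A raises ZeroDivisionError, B raises ZeroDivisionError; on solution(-4, 0, 3): A returns [], B returns [1, 0, 0, 0]
import Mathlib
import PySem

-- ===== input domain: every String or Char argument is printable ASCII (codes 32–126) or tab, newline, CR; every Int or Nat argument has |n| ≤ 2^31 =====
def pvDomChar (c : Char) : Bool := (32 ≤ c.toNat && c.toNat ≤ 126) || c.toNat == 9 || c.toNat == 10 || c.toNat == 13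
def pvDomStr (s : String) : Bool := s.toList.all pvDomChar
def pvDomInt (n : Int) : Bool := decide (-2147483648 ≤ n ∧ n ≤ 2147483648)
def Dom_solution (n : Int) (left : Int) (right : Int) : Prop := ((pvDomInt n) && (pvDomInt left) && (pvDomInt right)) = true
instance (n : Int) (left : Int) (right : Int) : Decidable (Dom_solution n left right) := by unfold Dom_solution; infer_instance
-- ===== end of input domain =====

-- B replaces A's row-by-row construction + slice by a direct per-index formula
-- max(k//n, k%n) + 1 over k ∈ [left, right]: one comprehension, no intermediate grid.


-- ===== PORT A =====
def solution (n : Int) (left : Int) (right : Int) : List Int :=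
  let start_row := PySem.Int.floordiv left n
  let end_row := PySem.Int.floordiv right n
  let new_list : List Int :=
    (PySem.List.pyRange start_row (end_row + 1) 1).foldl (fun acc i =>
      (PySem.List.pyRange 0 n 1).foldl (fun acc2 j =>
        if j ≤ i then acc2 ++ [i + 1] else acc2 ++ [j + 1]) acc) []
  PySem.List.slice new_list (some (PySem.Int.mod left n))
    (some ((end_row - start_row) * n + PySem.Int.mod right n + 1))

-- ===== PORT B =====
def solution_alt (n : Int) (left : Int) (right : Int) : List Int :=
  (PySem.List.pyRange left (right + 1) 1).map
    (fun k => max (PySem.Int.floordiv k n) (PySem.Int.mod k n) + 1)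

-- ===== PRECONDITION & SPEC =====
-- Pre_ restricts to the natural domain of grid sizes: A raises ZeroDivisionError at n = 0,
-- and for n < 0 (no grid exists) A's constant [] is an artefact of range(n) being empty.
def Pre_solution (n : Int) (left : Int) (right : Int) : Prop := 1 ≤ n
instance (n : Int) (left : Int) (right : Int) : Decidable (Pre_solution n left right) := by
  unfold Pre_solution; infer_instance

def pvWitness_solution : Int × Int × Int := (3, 2, 5)

def Spec_solution (n : Int) (left : Int) (right : Int) (out : List Int) : Prop := out = solution_alt n left right
instance (n : Int) (left : Int) (right : Int) (out : List Int) : Decidable (Spec_solution n left right out) := by unfold Spec_solution; infer_instance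

-- ===== CLAIM (what is proved, stated in full; the proofs are below) =====
def Claim_equal_solution : Prop := ∀ (n : Int) (left : Int) (right : Int), Dom_solution n left right → Pre_solution n left right → Spec_solution n left right (solution n left right)

-- ===== LEMMAS AND PROOFS =====

-- dropping from a unit-step range shifts its start
theorem pyRange_drop (lo hi : Int) (k : Nat) :
    (PySem.List.pyRange lo hi 1).drop k = PySem.List.pyRange (lo + k) hi 1 := by
  apply List.ext_getElem
  · simp [PySem.List.length_pyRange_one]; omega
  · intro i h1 h2
    simp only [List.getElem_drop, PySem.List.getElem_pyRange_one]
    push_cast; ring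

-- taking from a unit-step range clamps its end
theorem pyRange_take (lo hi : Int) (k : Nat) :
    (PySem.List.pyRange lo hi 1).take k = PySem.List.pyRange lo (min hi (lo + k)) 1 := by
  apply List.ext_getElem
  · simp [PySem.List.length_pyRange_one]; omega
  · intro i h1 h2
    simp only [List.getElem_take, PySem.List.getElem_pyRange_one]

-- one row of A's grid, written as B's formula over the flat indices of that row
theorem row_eq (n i : Int) (hn : 0 < n) :
    (PySem.List.pyRange 0 n 1).map (fun j => if j ≤ i then i + 1 else j + 1)
      = (PySem.List.pyRange (i * n) (i * n + n) 1).map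
          (fun k => max (PySem.Int.floordiv k n) (PySem.Int.mod k n) + 1) := by
  apply List.ext_getElem
  · simp [PySem.List.length_pyRange_one]
  · intro p h1 h2
    simp only [List.getElem_map, PySem.List.getElem_pyRange_one, zero_add]
    have hp : (p : Int) < n := by
      have := h1; simp [PySem.List.length_pyRange_one] at this; omega
    have hcomm : i * n + (p : Int) = (p : Int) + n * i := by ring
    have hdiv : PySem.Int.floordiv (i * n + p) n = i := by
      rw [PySem.Int.floordiv_eq_ediv_of_pos hn, hcomm,
        Int.add_mul_ediv_left _ i (by omega : n ≠ 0),
        Int.ediv_eq_zero_of_lt (by positivity) hp]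
      ring
    have hmod : PySem.Int.mod (i * n + p) n = (p : Int) := by
      rw [PySem.Int.mod_eq_emod_of_pos hn, hcomm, Int.add_mul_emod_self_left]
      exact Int.emod_eq_of_lt (by positivity) hp
    rw [hdiv, hmod]
    rcases le_or_gt (p : Int) i with h | h
    · rw [if_pos h, max_eq_left h]
    · rw [if_neg (not_le.mpr h), max_eq_right h.le]

-- concatenating the rows s, s+1, …, b-1 gives the flat indices s*n … b*n-1
theorem rows_flat (n : Int) (hn : 0 < n) (f : Int → Int) (s b : Int) :
    (PySem.List.pyRange s b 1).flatMap
        (fun i => (PySem.List.pyRange (i * n) (i * n + n) 1).map f)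
      = (PySem.List.pyRange (s * n) (b * n) 1).map f := by
  rcases le_or_gt s b with hsb | hsb
  · obtain ⟨d, hd⟩ : ∃ d : Nat, b = s + d := ⟨(b - s).toNat, by omega⟩
    subst hd
    clear hsb
    induction d generalizing s with
    | zero =>
      simp [PySem.List.pyRange_one_eq_nil (le_refl s),
        PySem.List.pyRange_one_eq_nil (le_refl (s * n))]
    | succ m ih =>
      push_cast
      rw [PySem.List.pyRange_one_cons (by push_cast; omega : s < s + ((m : Int) + 1))]
      rw [List.flatMap_cons]
      have h1 : s + ((m : Int) + 1) = (s + 1) + (m : Int) := by ring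
      rw [h1, ih (s + 1)]
      have h3 : (s + 1) * n = s * n + n := by ring
      have h4 : (s + 1) * n + (m : Int) * n = (s + 1 + (m : Int)) * n := by ring
      have h5 : 0 ≤ (m : Int) * n := by positivity
      rw [h3, ← List.map_append,
        ← PySem.List.pyRange_one_append (s * n) (s * n + n) ((s + 1 + (m : Int)) * n)
          (by omega) (by omega)]
  · rw [PySem.List.pyRange_one_eq_nil hsb.le,
      PySem.List.pyRange_one_eq_nil (by nlinarith : b * n ≤ s * n)]
    simp

theorem slice_nil (a b : Int) :
    PySem.List.slice ([] : List Int) (some a) (some b) = [] := by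
  rcases hs : PySem.List.slice ([] : List Int) (some a) (some b) with _ | ⟨x, xs⟩
  · rfl
  · have hx : x ∈ PySem.List.slice ([] : List Int) (some a) (some b) := by
      rw [hs]; exact List.mem_cons_self
    have := PySem.List.mem_of_mem_slice ([] : List Int) (some a) (some b) hx
    simp at this

-- ===== VERDICT (by name: the statement is the Claim_ definition above) =====
theorem solution_spec : Claim_equal_solution := by
  intro n left right _ hn
  unfold Pre_solution at hn
  unfold Spec_solution solution solution_alt
  dsimp only
  have hn0 : 0 < n := hn
  set s := PySem.Int.floordiv left n with hs
  set e := PySem.Int.floordiv right n with he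
  have hsd : s = left / n := by rw [hs, PySem.Int.floordiv_eq_ediv_of_pos hn0]
  have hed : e = right / n := by rw [he, PySem.Int.floordiv_eq_ediv_of_pos hn0]
  have hlm : PySem.Int.mod left n = left % n := PySem.Int.mod_eq_emod_of_pos hn0
  have hrm : PySem.Int.mod right n = right % n := PySem.Int.mod_eq_emod_of_pos hn0
  have hl1 : n * s + left % n = left := by rw [hsd]; exact Int.ediv_add_emod left n
  have hl2 : 0 ≤ left % n := Int.emod_nonneg left (by omega)
  have hl3 : left % n < n := Int.emod_lt_of_pos left hn0
  have hr1 : n * e + right % n = right := by rw [hed]; exact Int.ediv_add_emod right n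
  have hr2 : 0 ≤ right % n := Int.emod_nonneg right (by omega)
  have hr3 : right % n < n := Int.emod_lt_of_pos right hn0
  -- the inner loop appends one value per j; rewrite the nested fold into flatMap-of-map
  have hinner : ∀ (acc : List Int) (i : Int),
      (PySem.List.pyRange 0 n 1).foldl (fun acc2 j =>
        if j ≤ i then acc2 ++ [i + 1] else acc2 ++ [j + 1]) acc
      = acc ++ (PySem.List.pyRange 0 n 1).map (fun j => if j ≤ i then i + 1 else j + 1) := by
    intro acc i
    rw [← PySem.List.foldl_append_singleton_eq_map]
    apply PySem.List.foldl_congr_mem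
    intro a x _
    split <;> rfl
  have houter :
      (PySem.List.pyRange s (e + 1) 1).foldl (fun acc i =>
        (PySem.List.pyRange 0 n 1).foldl (fun acc2 j =>
          if j ≤ i then acc2 ++ [i + 1] else acc2 ++ [j + 1]) acc) ([] : List Int)
      = (PySem.List.pyRange (s * n) ((e + 1) * n) 1).map
          (fun k => max (PySem.Int.floordiv k n) (PySem.Int.mod k n) + 1) := by
    calc (PySem.List.pyRange s (e + 1) 1).foldl (fun acc i =>
          (PySem.List.pyRange 0 n 1).foldl (fun acc2 j =>
            if j ≤ i then acc2 ++ [i + 1] else acc2 ++ [j + 1]) acc) ([] : List Int)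
        = (PySem.List.pyRange s (e + 1) 1).foldl (fun acc i =>
            acc ++ (PySem.List.pyRange (i * n) (i * n + n) 1).map
              (fun k => max (PySem.Int.floordiv k n) (PySem.Int.mod k n) + 1)) [] := by
          apply PySem.List.foldl_congr_mem
          intro acc i _
          rw [hinner, row_eq n i hn0]
      _ = (PySem.List.pyRange (s * n) ((e + 1) * n) 1).map
            (fun k => max (PySem.Int.floordiv k n) (PySem.Int.mod k n) + 1) := by
          rw [PySem.List.foldl_append_eq_flatMap, rows_flat n hn0 _ s (e + 1)]
          simp
  have e1 : left % n = left - n * s := by omega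
  have e2 : right % n = right - n * e := by omega
  have e3 : (e - s) * n = n * e - n * s := by ring
  have e4 : (e + 1) * n = n * e + n := by ring
  have e5 : s * n = n * s := by ring
  rw [houter, hlm, hrm]
  rcases le_or_gt s e with hse | hes
  · -- rows exist; slice the flat map
    have ha : (0 : Int) ≤ left % n := hl2
    have hb : (0 : Int) ≤ (e - s) * n + right % n + 1 := by nlinarith
    rw [PySem.List.slice_toNat _ ha hb, ← List.map_drop, pyRange_drop, ← List.map_take,
      pyRange_take]
    have hstart : s * n + ((left % n).toNat : Int) = left := by
      rw [Int.toNat_of_nonneg hl2]; omega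
    rw [hstart]
    rcases le_or_gt left right with hlr | hrl
    · have hc : ((((e - s) * n + right % n + 1).toNat - (left % n).toNat : Nat) : Int)
          = right - left + 1 := by
        have h4 : (e - s) * n = n * e - n * s := by ring
        omega
      rw [hc]
      have hmin : min ((e + 1) * n) (left + (right - left + 1)) = right + 1 := by
        have h5 : (e + 1) * n = n * e + n := by ring
        omega
      rw [hmin]
    · -- same claim row, empty slice: left%n ≥ the stop offset
      have hc : (((e - s) * n + right % n + 1).toNat - (left % n).toNat : Nat) = 0 := by omega
      rw [hc]
      have h6 : n * s ≤ n * e := by nlinarith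
      have hmin : min ((e + 1) * n) (left + ((0 : Nat) : Int)) = left := by
        push_cast; omega
      rw [hmin, PySem.List.pyRange_one_eq_nil (le_refl left),
        PySem.List.pyRange_one_eq_nil (by omega : right + 1 ≤ left)]
  · -- e < s : both sides are empty
    have hrl : right < left := by
      by_contra hcon
      have : left / n ≤ right / n := Int.ediv_le_ediv hn0 (not_lt.mp hcon)
      omega
    have hmul : (e + 1) * n ≤ s * n := by nlinarith
    rw [PySem.List.pyRange_one_eq_nil hmul, List.map_nil, slice_nil,
      PySem.List.pyRange_one_eq_nil (by omega : right + 1 ≤ left)]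
    simp
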